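-- pv_equiv track=rewrite | github.com/sayanmndl21/omsparetoanalysis | methods.py | getextremepts
-- ===== SOURCE A (Python) =====
-- def getextremepts(extremepts):
--     ptsx = []
--     ptsy = []
--     for x,y in extremepts:
--         ptsx += [x]
--         ptsy += [y]
--
--     pt1 = [max(ptsx),max(ptsy)]
--     pt2 = [max(ptsx),min(ptsy)]
--     pt3 = [min(ptsx),max(ptsy)]
--     pt4 = [min(ptsx),min(ptsy)]
--     return pt1, pt2, pt3, pt4
-- ===== SOURCE B (Python) =====
-- def getextremepts(extremepts):
--     it = iter(extremepts)
--     try: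
--         x, y = next(it)
--     except StopIteration:
--         raise ValueError("max() arg is an empty sequence")
--     maxx = minx = x
--     maxy = miny = y
--     for x, y in it:
--         if x > maxx: maxx = x
--         if x < minx: minx = x
--         if y > maxy: maxy = y
--         if y < miny: miny = y
--     return [maxx, maxy], [maxx, miny], [minx, maxy], [minx, miny]
-- ===== Notes on version B (the rewrite author's own statement) =====
-- stated objective: simpler
-- what changed: B replaces A's two intermediate coordinate lists plus four max/min scans by one single pass maintaining four running extrema accumulators.
import Mathlib
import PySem

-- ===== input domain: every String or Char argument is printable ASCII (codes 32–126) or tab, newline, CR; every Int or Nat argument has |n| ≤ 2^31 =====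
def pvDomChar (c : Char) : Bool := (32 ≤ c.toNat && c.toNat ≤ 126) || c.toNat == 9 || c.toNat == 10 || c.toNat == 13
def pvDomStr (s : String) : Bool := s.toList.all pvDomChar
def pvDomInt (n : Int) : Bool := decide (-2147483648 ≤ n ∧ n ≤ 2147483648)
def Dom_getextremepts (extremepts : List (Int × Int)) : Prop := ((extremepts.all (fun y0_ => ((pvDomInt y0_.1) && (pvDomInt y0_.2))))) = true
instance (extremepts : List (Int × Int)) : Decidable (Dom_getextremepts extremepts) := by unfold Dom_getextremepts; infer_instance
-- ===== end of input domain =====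

-- B replaces A's two intermediate coordinate lists plus four max/min scans by one
-- single pass maintaining four running extrema accumulators (objective: simpler).

-- ===== PORT A =====
-- A: build ptsx, ptsy by the loop, then max/min each list four times.
-- PySem.List.max?/min? return none on [] (Python's ValueError); Pre_ excludes that,
-- the .getD 0 below is never reached inside Pre_.
def getextremepts (extremepts : List (Int × Int)) : List Int × List Int × List Int × List Int :=
  let pts := extremepts.foldl (fun (acc : List Int × List Int) xy =>
    (acc.1 ++ [xy.1], acc.2 ++ [xy.2])) ([], [])
  let ptsx := pts.1
  let ptsy := pts.2
  let pt1 := [(PySem.List.max? ptsx (fun v => v)).getD 0, (PySem.List.max? ptsy (fun v => v)).getD 0]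
  let pt2 := [(PySem.List.max? ptsx (fun v => v)).getD 0, (PySem.List.min? ptsy (fun v => v)).getD 0]
  let pt3 := [(PySem.List.min? ptsx (fun v => v)).getD 0, (PySem.List.max? ptsy (fun v => v)).getD 0]
  let pt4 := [(PySem.List.min? ptsx (fun v => v)).getD 0, (PySem.List.min? ptsy (fun v => v)).getD 0]
  (pt1, pt2, pt3, pt4)

-- ===== PORT B =====
-- single pass with four running accumulators, seeded from the first pair
def getextremeptsGo (maxx minx maxy miny : Int) :
    List (Int × Int) → List Int × List Int × List Int × List Int
  | [] => ([maxx, maxy], [maxx, miny], [minx, maxy], [minx, miny])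
  | (x, y) :: rest =>
      getextremeptsGo (if x > maxx then x else maxx) (if x < minx then x else minx)
        (if y > maxy then y else maxy) (if y < miny then y else miny) rest

def getextremepts_alt (extremepts : List (Int × Int)) : List Int × List Int × List Int × List Int :=
  match extremepts with
  | [] => ([], [], [], [])          -- ValueError in Python B; outside Pre_
  | (x, y) :: rest => getextremeptsGo x x y y rest

-- ===== PRECONDITION & SPEC =====
-- Pre_ excludes the empty list, on which both Pythons raise ValueError.
def Pre_getextremepts (extremepts : List (Int × Int)) : Prop := extremepts ≠ []
instance (extremepts : List (Int × Int)) : Decidable (Pre_getextremepts extremepts) := by unfold Pre_getextremepts; infer_instance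
def pvWitness_getextremepts : (List (Int × Int)) := [(1, 2), (-3, 4)]

def Spec_getextremepts (extremepts : List (Int × Int)) (out : List Int × List Int × List Int × List Int) : Prop := out = getextremepts_alt extremepts
instance (extremepts : List (Int × Int)) (out : List Int × List Int × List Int × List Int) : Decidable (Spec_getextremepts extremepts out) := by unfold Spec_getextremepts; infer_instance

-- ===== CLAIM (what is proved, stated in full; the proofs are below) =====
def Claim_equal_getextremepts : Prop := ∀ (extremepts : List (Int × Int)), Dom_getextremepts extremepts → Pre_getextremepts extremepts → Spec_getextremepts extremepts (getextremepts extremepts)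

-- ===== LEMMAS AND PROOFS =====

theorem pv_foldl_pair (l : List (Int × Int)) (ax ay : List Int) :
    l.foldl (fun (acc : List Int × List Int) xy => (acc.1 ++ [xy.1], acc.2 ++ [xy.2])) (ax, ay)
      = (ax ++ l.map Prod.fst, ay ++ l.map Prod.snd) := by
  induction l generalizing ax ay with
  | nil => simp
  | cons h t ih => simp [List.foldl, ih]

theorem pv_if_max (m x : Int) : (if x > m then x else m) = max m x := by
  simp only [max_def]; split_ifs <;> omega

theorem pv_if_min (m x : Int) : (if x < m then x else m) = min m x := by
  simp only [min_def]; split_ifs <;> omega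

theorem pv_go_char (rest : List (Int × Int)) (maxx minx maxy miny : Int) :
    getextremeptsGo maxx minx maxy miny rest =
      ([(rest.map Prod.fst).foldl max maxx, (rest.map Prod.snd).foldl max maxy],
       [(rest.map Prod.fst).foldl max maxx, (rest.map Prod.snd).foldl min miny],
       [(rest.map Prod.fst).foldl min minx, (rest.map Prod.snd).foldl max maxy],
       [(rest.map Prod.fst).foldl min minx, (rest.map Prod.snd).foldl min miny]) := by
  induction rest generalizing maxx minx maxy miny with
  | nil => simp [getextremeptsGo]
  | cons h t ih =>
      obtain ⟨x, y⟩ := h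
      simp only [getextremeptsGo, ih, pv_if_max, pv_if_min, List.map, List.foldl]

theorem getextremepts_main (x y : Int) (rest : List (Int × Int)) :
    getextremepts ((x, y) :: rest) = getextremepts_alt ((x, y) :: rest) := by
  simp only [getextremepts, getextremepts_alt, pv_foldl_pair, pv_go_char,
    List.nil_append, List.map]
  simp [PySem.List.max?_id_cons, PySem.List.min?_id_cons]

-- ===== VERDICT (by name: the statement is the Claim_ definition above) =====
theorem getextremepts_spec : Claim_equal_getextremepts := by
  intro l _ hpre
  match l with
  | [] => exact absurd rfl hpre
  | (x, y) :: rest => exact (getextremepts_main x y rest).symm ▸ rfl
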